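-- pv_equiv track=rewrite | github.com/petevieira/grammar | nlputils.py | trigramify
-- ===== SOURCE A (Python) =====
-- def trigramify(words, sid):
--     o = []           # create empty list
--     wid = -1
--     t0 = "^"         # beginning of sentence marker
--     t1 = "^"
--     # create trigrams, where t0, t1 and w are the
--     # three words in the trigram, with sentence id
--     # and word id corresponding to the word in the
--     # middle of the trigram
--     for w in words:
--         if wid >= 0:
--             o.append( (t0, t1, w, (sid, wid)) )
--         t0 = t1
--         t1 = w
--         wid += 1
--     # add the last trigram with the last two words and
--     # and the end of sentence marker, '$'
--     o.append( (t0, t1, "$", (sid, wid)) )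
--     return o
-- ===== SOURCE B (Python) =====
-- def trigramify(words, sid):
--     if not words:
--         return [("^", "^", "$", (sid, -1))]
--     p = ["^"] + list(words) + ["$"]
--     return [(p[i], p[i + 1], p[i + 2], (sid, i)) for i in range(len(words))]
-- ===== Notes on version B (the rewrite author's own statement) =====
-- stated objective: idiomatic
-- what changed: B materializes the padded list ['^']+words+['$'] and emits each trigram by windowed indexing, instead of A's running-state loop over (t0,t1,wid) with a trailing extra append; the empty input keeps its single ('^','^','$',(sid,-1)) trigram as an explicit base case.
import Mathlib
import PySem

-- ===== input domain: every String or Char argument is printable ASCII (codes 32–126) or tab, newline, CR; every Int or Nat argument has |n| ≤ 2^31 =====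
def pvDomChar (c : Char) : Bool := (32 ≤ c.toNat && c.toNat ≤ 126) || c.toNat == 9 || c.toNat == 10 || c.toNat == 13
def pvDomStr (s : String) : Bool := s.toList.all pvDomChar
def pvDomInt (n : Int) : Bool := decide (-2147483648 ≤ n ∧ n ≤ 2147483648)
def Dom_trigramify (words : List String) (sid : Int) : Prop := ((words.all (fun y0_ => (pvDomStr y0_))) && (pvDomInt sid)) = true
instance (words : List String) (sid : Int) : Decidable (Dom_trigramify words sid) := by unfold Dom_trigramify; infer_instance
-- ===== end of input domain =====

-- B builds the padded list ['^'] ++ words ++ ['$'] once and reads each trigram off it by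
-- windowed indexing (idiomatic; same O(n) cost), instead of A's running-state loop.

-- ===== PORT A =====
-- literal transliteration of A: fold over words with state (o, wid, t0, t1), then the final append
def trigramify (words : List String) (sid : Int) : List (String × String × String × (Int × Int)) :=
  let st := words.foldl
    (fun (st : List (String × String × String × (Int × Int)) × Int × String × String) w =>
      let o := st.1; let wid := st.2.1; let t0 := st.2.2.1; let t1 := st.2.2.2
      let o := if wid ≥ 0 then o ++ [(t0, t1, w, (sid, wid))] else o
      (o, wid + 1, t1, w))
    ([], -1, "^", "^")
  st.1 ++ [(st.2.2.1, st.2.2.2, "$", (sid, st.2.1))]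

-- ===== PORT B =====
-- transliteration of Source B; p[i] etc. are always in range, ported as getD (exact here)
def trigramify_alt (words : List String) (sid : Int) : List (String × String × String × (Int × Int)) :=
  if words = [] then [("^", "^", "$", (sid, -1))]
  else
    let p := ["^"] ++ words ++ ["$"]
    (List.range words.length).map
      (fun i => (p.getD i "", p.getD (i + 1) "", p.getD (i + 2) "", (sid, (i : Int))))

-- ===== PRECONDITION & SPEC =====
def Spec_trigramify (words : List String) (sid : Int) (out : List (String × String × String × (Int × Int))) : Prop := out = trigramify_alt words sid
instance (words : List String) (sid : Int) (out : List (String × String × String × (Int × Int))) : Decidable (Spec_trigramify words sid out) := by unfold Spec_trigramify; infer_instance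

-- ===== CLAIM (what is proved, stated in full; the proofs are below) =====
def Claim_equal_trigramify : Prop := ∀ (words : List String) (sid : Int), Dom_trigramify words sid → Spec_trigramify words sid (trigramify words sid)

-- ===== LEMMAS AND PROOFS =====

-- trigram stream generated directly: the common characterisation of both ports
def tri (sid : Int) : String → String → List String → Int → List (String × String × String × (Int × Int))
  | t0, t1, [], n => [(t0, t1, "$", (sid, n))]
  | t0, t1, w :: ws, n => (t0, t1, w, (sid, n)) :: tri sid t1 w ws (n + 1)

def triStep (sid : Int) :
    List (String × String × String × (Int × Int)) × Int × String × String → String →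
    List (String × String × String × (Int × Int)) × Int × String × String :=
  fun st w =>
    let o := st.1; let wid := st.2.1; let t0 := st.2.2.1; let t1 := st.2.2.2
    let o := if wid ≥ 0 then o ++ [(t0, t1, w, (sid, wid))] else o
    (o, wid + 1, t1, w)

theorem foldl_tri (sid : Int) :
    ∀ (ws : List String) (o : List (String × String × String × (Int × Int)))
      (t0 t1 : String) (n : Int), 0 ≤ n →
      (let st := ws.foldl (triStep sid) (o, n, t0, t1)
       st.1 ++ [(st.2.2.1, st.2.2.2, "$", (sid, st.2.1))]) = o ++ tri sid t0 t1 ws n := by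
  intro ws
  induction ws with
  | nil => intro o t0 t1 n hn; simp [tri]
  | cons w ws ih =>
      intro o t0 t1 n hn
      have h1 : (0 : Int) ≤ n + 1 := by omega
      simp only [List.foldl_cons, tri]
      rw [show triStep sid (o, n, t0, t1) w
          = (o ++ [(t0, t1, w, (sid, n))], n + 1, t1, w) by
        simp [triStep, hn]]
      rw [ih (o ++ [(t0, t1, w, (sid, n))]) t1 w (n + 1) h1]
      simp

theorem tri_eq_map (sid : Int) :
    ∀ (ws : List String) (t0 t1 : String) (c : Int),
      tri sid t0 t1 ws c =
        (List.range (ws.length + 1)).map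
          (fun i =>
            let p := t0 :: t1 :: (ws ++ ["$"])
            (p.getD i "", p.getD (i + 1) "", p.getD (i + 2) "", (sid, c + (i : Int)))) := by
  intro ws
  induction ws with
  | nil => intro t0 t1 c; simp [tri, List.range_succ, List.getD]
  | cons w ws ih =>
      intro t0 t1 c
      simp only [List.length_cons]
      rw [List.range_succ_eq_map]
      simp only [tri, List.map_cons, List.map_map]
      congr 1
      · simp
      · rw [ih t1 w (c + 1)]
        apply List.map_congr_left
        intro i _
        simp only [Function.comp, List.getD, Nat.succ_eq_add_one, List.cons_append,
          List.getElem?_cons_succ, Prod.mk.injEq]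
        exact ⟨trivial, trivial, trivial, trivial, by omega⟩

-- ===== VERDICT (by name: the statement is the Claim_ definition above) =====
theorem trigramify_spec : Claim_equal_trigramify := by
  intro words sid _
  show trigramify words sid = trigramify_alt words sid
  cases words with
  | nil => simp [trigramify, trigramify_alt]
  | cons w ws =>
      unfold trigramify trigramify_alt
      have hstep : (fun (st : List (String × String × String × (Int × Int)) × Int × String × String) w =>
          let o := st.1; let wid := st.2.1; let t0 := st.2.2.1; let t1 := st.2.2.2
          let o := if wid ≥ 0 then o ++ [(t0, t1, w, (sid, wid))] else o
          (o, wid + 1, t1, w)) = triStep sid := rfl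
      have h0 : triStep sid (([] : List (String × String × String × (Int × Int))), -1, "^", "^") w
          = ([], 0, "^", w) := by norm_num [triStep]
      rw [hstep, List.foldl_cons, h0]
      have := foldl_tri sid ws [] "^" w 0 (le_refl 0)
      simp only at this
      rw [this]
      rw [tri_eq_map sid ws "^" w 0]
      simp
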